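-- pv_equiv track=rewrite | github.com/rafibhatia/zevy | list/h_t.py | check_streak
-- ===== SOURCE A (Python) =====
-- def check_streak(flips, streak_length):
--     count = 1  # Start counting from the first element
--     streak_count = 0  # Variable to count how many streaks of the given length happen
--
--     for i in range(1, len(flips)):
--         if flips[i] == flips[i - 1]:  # Check if the current flip is the same as the previous one
--             count += 1
--             if count == streak_length:
--                 streak_count += 1  # Increment the streak count if a streak is found
--                 count = 1  # Reset the count after detecting a streak (optional behavior)
--         else:
--             count = 1  # Reset the count if the flip is different
--
--     return streak_count
-- ===== SOURCE B (Python) =====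
-- def check_streak(flips, streak_length):
--     # Decompose into maximal runs of equal elements; a run with k equal
--     # adjacent pairs yields k // (streak_length - 1) streaks (count resets
--     # to 1 after each detected streak).  streak_length < 2 can never fire
--     # the original's count == streak_length test, so the total is 0.
--     if streak_length < 2:
--         return 0
--     total = 0
--     i = 0
--     n = len(flips)
--     while i < n:
--         j = i + 1
--         while j < n and flips[j] == flips[i]:
--             j += 1
--         total += (j - i - 1) // (streak_length - 1)
--         i = j
--     return total
-- ===== Notes on version B (the rewrite author's own statement) =====
-- stated objective: alternative
-- what changed: B replaces the per-index counter loop by a run decomposition: it scans each maximal run of equal elements once and adds (run_pairs)//(streak_length-1) in closed form, returning 0 immediately for streak_length < 2 where A's count==streak_length test can never fire.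
import Mathlib
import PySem

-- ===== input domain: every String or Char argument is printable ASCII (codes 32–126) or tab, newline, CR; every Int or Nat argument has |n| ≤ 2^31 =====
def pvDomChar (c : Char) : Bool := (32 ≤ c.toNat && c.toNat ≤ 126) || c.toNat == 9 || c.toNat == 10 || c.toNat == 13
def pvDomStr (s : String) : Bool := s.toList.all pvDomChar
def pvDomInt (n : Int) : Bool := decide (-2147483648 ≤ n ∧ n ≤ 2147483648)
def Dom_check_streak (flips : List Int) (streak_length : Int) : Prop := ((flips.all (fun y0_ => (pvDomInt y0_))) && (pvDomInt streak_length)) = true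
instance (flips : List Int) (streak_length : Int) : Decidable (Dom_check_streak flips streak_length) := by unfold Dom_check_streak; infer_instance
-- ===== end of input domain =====

-- B counts streaks per maximal run of equal elements with one floor division per run,
-- instead of A's per-index counter; same return value, alternative decomposition.

-- ===== PORT A =====
-- literal transliteration of A: fold over range(1, len(flips)) with state (count, streak_count)
def check_streak (flips : List Int) (streak_length : Int) : Int :=
  (((PySem.List.pyRange 1 (flips.length : Int) 1).foldl
    (fun (st : Int × Int) i =>
      if PySem.List.pyGetD flips i 0 = PySem.List.pyGetD flips (i - 1) 0 then
        (if st.1 + 1 = streak_length then (1, st.2 + 1) else (st.1 + 1, st.2))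
      else (1, st.2))
    (1, 0)) : Int × Int).2

-- ===== PORT B =====
-- inner while loop of Source B: number of leading elements of the list equal to a, and the rest
def runSplit (a : Int) : List Int → Nat × List Int
  | [] => (0, [])
  | b :: t => if b = a then ((runSplit a t).1 + 1, (runSplit a t).2) else (0, b :: t)

theorem runSplit_length (a : Int) (t : List Int) : (runSplit a t).2.length ≤ t.length := by
  induction t with
  | nil => simp [runSplit]
  | cons b t ih =>
    by_cases h : b = a
    · simp [runSplit, h]; omega
    · simp [runSplit, h]

-- outer while loop of Source B: one floor division per maximal run
def goB (L : Int) : List Int → Int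
  | [] => 0
  | a :: t =>
    PySem.Int.floordiv ((runSplit a t).1 : Int) (L - 1) + goB L (runSplit a t).2
termination_by l => l.length
decreasing_by
  have := runSplit_length a t
  simp; omega

def check_streak_alt (flips : List Int) (streak_length : Int) : Int :=
  if streak_length < 2 then 0 else goB streak_length flips

-- ===== PRECONDITION & SPEC =====
def Spec_check_streak (flips : List Int) (streak_length : Int) (out : Int) : Prop := out = check_streak_alt flips streak_length
instance (flips : List Int) (streak_length : Int) (out : Int) : Decidable (Spec_check_streak flips streak_length out) := by unfold Spec_check_streak; infer_instance

-- ===== CLAIM (what is proved, stated in full; the proofs are below) =====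
def Claim_equal_check_streak : Prop := ∀ (flips : List Int) (streak_length : Int), Dom_check_streak flips streak_length → Spec_check_streak flips streak_length (check_streak flips streak_length)

-- ===== LEMMAS AND PROOFS =====

-- the loop body of A, as a function of (prev, cur)
def stepA (L : Int) (st : Int × Int) (p c : Int) : Int × Int :=
  if c = p then (if st.1 + 1 = L then (1, st.2 + 1) else (st.1 + 1, st.2)) else (1, st.2)

-- A's loop rewritten as structural recursion carrying the previous element
def pairFold (L : Int) : Int → List Int → Int × Int → Int × Int
  | _, [], s => s
  | p, b :: t, s => pairFold L b t (stepA L s p b)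

theorem pyGetD_cons_of_pos (x : Int) (xs : List Int) (i : Int) (d : Int) (h : 1 ≤ i) :
    PySem.List.pyGetD (x :: xs) i d = PySem.List.pyGetD xs (i - 1) d := by
  obtain ⟨k, rfl⟩ : ∃ k : Nat, i = ((k + 1 : Nat) : Int) := ⟨(i - 1).toNat, by omega⟩
  have h2 : ((k + 1 : Nat) : Int) - 1 = ((k : Nat) : Int) := by push_cast; ring
  rw [PySem.List.pyGetD_natCast, h2, PySem.List.pyGetD_natCast]
  simp

-- shifting the index range of a fold by one
theorem foldl_pyRange_shift {α : Type} (f : α → Int → α) (a b : Int) (s : α) :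
    (PySem.List.pyRange (a + 1) (b + 1) 1).foldl f s
      = (PySem.List.pyRange a b 1).foldl (fun s i => f s (i + 1)) s := by
  rw [PySem.List.pyRange_one, PySem.List.pyRange_one]
  have : (b + 1 - (a + 1)) = b - a := by ring
  rw [this, List.foldl_map, List.foldl_map]
  apply PySem.List.foldl_congr_mem
  intro acc x _
  have : a + 1 + (x : Int) = a + (x : Int) + 1 := by ring
  rw [this]

-- A's index fold over [1, len) equals the structural pair recursion
theorem bridge (L : Int) : ∀ (t : List Int) (a : Int) (s : Int × Int),
    (PySem.List.pyRange 1 ((t.length : Int) + 1) 1).foldl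
      (fun s i => stepA L s (PySem.List.pyGetD (a :: t) (i - 1) 0) (PySem.List.pyGetD (a :: t) i 0)) s
    = pairFold L a t s := by
  intro t
  induction t with
  | nil =>
    intro a s
    rw [PySem.List.pyRange_one_eq_nil (by simp)]
    rfl
  | cons b t ih =>
    intro a s
    have hlen : ((b :: t).length : Int) + 1 = ((t.length : Int) + 1) + 1 := by
      push_cast [List.length_cons]; ring
    rw [hlen, PySem.List.pyRange_one_cons (by omega)]
    rw [List.foldl_cons]
    have h0 : PySem.List.pyGetD (a :: b :: t) ((1 : Int) - 1) 0 = a := by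
      norm_num [PySem.List.pyGetD_zero_cons]
    have h1 : PySem.List.pyGetD (a :: b :: t) (1 : Int) 0 = b := by
      rw [pyGetD_cons_of_pos _ _ _ _ (by omega)]
      norm_num [PySem.List.pyGetD_zero_cons]
    rw [h0, h1]
    rw [foldl_pyRange_shift]
    have hcongr : (PySem.List.pyRange 1 ((t.length : Int) + 1) 1).foldl
        (fun s i => stepA L s (PySem.List.pyGetD (a :: b :: t) (i + 1 - 1) 0)
                              (PySem.List.pyGetD (a :: b :: t) (i + 1) 0)) (stepA L s a b)
      = (PySem.List.pyRange 1 ((t.length : Int) + 1) 1).foldl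
        (fun s i => stepA L s (PySem.List.pyGetD (b :: t) (i - 1) 0)
                              (PySem.List.pyGetD (b :: t) i 0)) (stepA L s a b) := by
      apply PySem.List.foldl_congr_mem
      intro acc x hx
      rw [PySem.List.mem_pyRange_one] at hx
      have e1 : (x : Int) + 1 - 1 = x := by ring
      rw [e1, pyGetD_cons_of_pos a _ x 0 hx.1, pyGetD_cons_of_pos a _ (x + 1) 0 (by omega)]
      have e2 : (x : Int) + 1 - 1 = x := by ring
      rw [e2]
    rw [hcongr, ih b (stepA L s a b)]
    rfl

-- when streak_length < 2, A's inner test count+1 == streak_length never fires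
theorem pairFold_small (L : Int) (hL : L < 2) : ∀ (t : List Int) (a c sc : Int), 1 ≤ c →
    (pairFold L a t (c, sc)).2 = sc := by
  intro t
  induction t with
  | nil => intro a c sc _; rfl
  | cons b t ih =>
    intro a c sc hc
    by_cases hba : b = a
    · have : stepA L (c, sc) a b = (c + 1, sc) := by
        simp only [stepA, if_pos hba]
        rw [if_neg (by omega)]
      rw [pairFold, this]
      exact ih b (c + 1) sc (by omega)
    · have : stepA L (c, sc) a b = (1, sc) := by
        simp only [stepA]
        rw [if_neg hba]
      rw [pairFold, this]
      exact ih b 1 sc le_rfl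

-- run-counting invariant: within a run the counter advances cyclically mod (L-1)
theorem pairFold_key (L : Int) (hL : 2 ≤ L) : ∀ (t : List Int) (a c sc : Int),
    1 ≤ c → c ≤ L - 1 →
    (pairFold L a t (c, sc)).2
      = sc + (c - 1 + ((runSplit a t).1 : Int)) / (L - 1) + goB L (runSplit a t).2 := by
  intro t
  induction t with
  | nil =>
    intro a c sc hc1 hc2
    have : (c - 1 + (((runSplit a ([] : List Int)).1 : Nat) : Int)) / (L - 1) = 0 := by
      simp only [runSplit]
      push_cast
      exact Int.ediv_eq_zero_of_lt (by omega) (by omega)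
    rw [this]
    simp [pairFold, runSplit, goB]
  | cons b t ih =>
    intro a c sc hc1 hc2
    by_cases hba : b = a
    · subst hba
      have hrs : runSplit b (b :: t) = ((runSplit b t).1 + 1, (runSplit b t).2) := by
        simp [runSplit]
      by_cases hcL : c + 1 = L
      · have hstep : stepA L (c, sc) b b = (1, sc + 1) := by
          simp [stepA, hcL]
        rw [pairFold, hstep, ih b 1 (sc + 1) le_rfl (by omega), hrs]
        dsimp only
        have harith : sc + 1 + ((1 : Int) - 1 + ((runSplit b t).1 : Int)) / (L - 1)
            = sc + (c - 1 + (((runSplit b t).1 + 1 : Nat) : Int)) / (L - 1) := by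
          push_cast
          have : c - 1 + (((runSplit b t).1 : Int) + 1) = (0 + ((runSplit b t).1 : Int)) + 1 * (L - 1) := by omega
          rw [this, Int.add_mul_ediv_right _ _ (by omega : L - 1 ≠ 0)]
          ring
        omega
      · have hstep : stepA L (c, sc) b b = (c + 1, sc) := by
          simp [stepA, hcL]
        rw [pairFold, hstep, ih b (c + 1) sc (by omega) (by omega), hrs]
        dsimp only
        have harith : (c + 1 - 1 + ((runSplit b t).1 : Int))
            = (c - 1 + (((runSplit b t).1 + 1 : Nat) : Int)) := by push_cast; ring
        rw [harith]
    · have hrs : runSplit a (b :: t) = (0, b :: t) := by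
        simp [runSplit, hba]
      have hstep : stepA L (c, sc) a b = (1, sc) := by
        simp only [stepA]; rw [if_neg hba]
      rw [pairFold, hstep, ih b 1 sc le_rfl (by omega), hrs]
      have h0 : (c - 1 + (((0 : Nat)) : Int)) / (L - 1) = 0 := by
        push_cast
        exact Int.ediv_eq_zero_of_lt (by omega) (by omega)
      rw [h0, goB]
      have : ((1 : Int) - 1 + ((runSplit b t).1 : Int)) = ((runSplit b t).1 : Int) := by ring
      rw [this, PySem.Int.floordiv_eq_ediv_of_pos (by omega : (0 : Int) < L - 1)]
      ring

-- A's fold (on a nonempty list) is exactly pairFold from state (1, 0)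
theorem check_streak_cons (a : Int) (t : List Int) (L : Int) :
    check_streak (a :: t) L = (pairFold L a t (1, 0)).2 := by
  unfold check_streak
  have hlen : (((a :: t).length : Nat) : Int) = (t.length : Int) + 1 := by
    push_cast [List.length_cons]; ring
  rw [hlen]
  rw [show (((PySem.List.pyRange 1 ((t.length : Int) + 1) 1).foldl
      (fun (st : Int × Int) i =>
        if PySem.List.pyGetD (a :: t) i 0 = PySem.List.pyGetD (a :: t) (i - 1) 0 then
          (if st.1 + 1 = L then (1, st.2 + 1) else (st.1 + 1, st.2))
        else (1, st.2)) (1, 0)) : Int × Int)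
    = (PySem.List.pyRange 1 ((t.length : Int) + 1) 1).foldl
      (fun s i => stepA L s (PySem.List.pyGetD (a :: t) (i - 1) 0) (PySem.List.pyGetD (a :: t) i 0)) (1, 0)
    from rfl]
  rw [bridge L t a (1, 0)]

-- ===== VERDICT (by name: the statement is the Claim_ definition above) =====
theorem check_streak_spec : Claim_equal_check_streak := by
  intro flips L _
  unfold Spec_check_streak check_streak_alt
  cases flips with
  | nil =>
    rw [show check_streak [] L = 0 from by
      unfold check_streak
      rw [show ((([] : List Int).length : Nat) : Int) = 0 from rfl,
        PySem.List.pyRange_one_eq_nil (by omega)]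
      rfl]
    split
    · rfl
    · rw [goB]
  | cons a t =>
    rw [check_streak_cons a t L]
    by_cases hL : L < 2
    · rw [if_pos hL]
      exact pairFold_small L hL t a 1 0 le_rfl
    · rw [if_neg hL]
      rw [pairFold_key L (by omega) t a 1 0 le_rfl (by omega)]
      rw [goB]
      have : ((1 : Int) - 1 + ((runSplit a t).1 : Int)) = ((runSplit a t).1 : Int) := by ring
      rw [this, PySem.Int.floordiv_eq_ediv_of_pos (by omega : (0 : Int) < L - 1)]
      ring
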